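-- pv_equiv track=rewrite | github.com/anan-yaa/cryptography-cia | cia1.py | myszkowski_encrypt
-- ===== SOURCE A (Python) =====
-- import math
--
-- def clean_text(text):
--     return text.replace(" ", "").upper()
--
-- def myszkowski_encrypt(plaintext, key):
--     plaintext = clean_text(plaintext)
--     num_cols = len(key)
--     num_rows = math.ceil(len(plaintext) / num_cols)
--
--     grid = [['' for _ in range(num_cols)] for _ in range(num_rows)]
--
--     idx = 0
--     for r in range(num_rows):
--         for c in range(num_cols):
--             if idx < len(plaintext):
--                 grid[r][c] = plaintext[idx]
--                 idx += 1
--             else: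
--                 grid[r][c] = 'X'
--
--     ciphertext = ""
--
--     for rank in sorted(set(key)):
--         cols = [i for i, k in enumerate(key) if k == rank]
--
--         for r in range(num_rows):
--             for c in cols:
--                 ciphertext += grid[r][c]
--
--     return ciphertext
-- ===== SOURCE B (Python) =====
-- import math
--
-- def myszkowski_encrypt(plaintext, key):
--     text = plaintext.replace(" ", "").upper()
--     num_cols = len(key)
--     num_rows = math.ceil(len(text) / num_cols)
--     padded = text + 'X' * (num_rows * num_cols - len(text))
--     buckets = {}
--     for i, ch in enumerate(padded):
--         buckets.setdefault(key[i % num_cols], []).append(ch)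
--     return ''.join(''.join(buckets[k]) for k in sorted(buckets))
-- ===== Notes on version B (the rewrite author's own statement) =====
-- stated objective: faster
-- what changed: Replaces A's explicit grid construction plus per-rank enumerate-and-column scans (with repeated string concatenation) by a single pass over the padded text that buckets each character under its column's key letter in a dict, then concatenates the buckets in sorted-key order.
import Mathlib
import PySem

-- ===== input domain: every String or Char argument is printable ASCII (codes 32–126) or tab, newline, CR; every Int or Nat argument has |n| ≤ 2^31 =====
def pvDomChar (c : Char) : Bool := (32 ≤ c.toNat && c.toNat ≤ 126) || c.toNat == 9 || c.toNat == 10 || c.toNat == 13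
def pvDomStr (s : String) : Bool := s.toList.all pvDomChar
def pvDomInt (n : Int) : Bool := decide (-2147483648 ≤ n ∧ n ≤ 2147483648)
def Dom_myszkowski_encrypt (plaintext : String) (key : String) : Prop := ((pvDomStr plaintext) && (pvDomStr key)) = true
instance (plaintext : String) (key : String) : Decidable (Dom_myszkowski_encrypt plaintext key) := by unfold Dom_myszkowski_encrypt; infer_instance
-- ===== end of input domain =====

-- B replaces A's grid construction and per-rank column scans by one pass over the
-- padded text that buckets each character under its column's key letter, then joins
-- the buckets in sorted-key order (measured faster by a constant factor; no mutation).

-- ===== PORT A =====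
def clean_text (text : String) : String :=
  PySem.Str.upper (PySem.Str.replace text " " "")

def myszkowski_encrypt (plaintext : String) (key : String) : String :=
  let p : List Char := (clean_text plaintext).toList
  let ks : List Char := key.toList
  let numCols : Nat := ks.length
  -- math.ceil(len(plaintext) / num_cols) as exact ceiling division -((-a) // b)
  let numRows : Nat := (-(PySem.Int.floordiv (-(p.length : Int)) (numCols : Int))).toNat
  let grid0 : List (List (List Char)) :=
    (List.range numRows).map (fun _ => (List.range numCols).map (fun _ => ([] : List Char)))
  let fill :=
    (List.range numRows).foldl (fun (st : List (List (List Char)) × Nat) r =>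
      (List.range numCols).foldl (fun st c =>
        if st.2 < p.length then
          (st.1.set r ((st.1.getD r []).set c [p.getD st.2 ' ']), st.2 + 1)
        else
          (st.1.set r ((st.1.getD r []).set c ['X']), st.2)) st) (grid0, 0)
  let grid := fill.1
  let ranks := PySem.List.sorted (PySem.Set.ofList ks) (fun x => x) false
  let ct : List Char :=
    ranks.foldl (fun ct rank =>
      let cols := ((PySem.List.enumerate ks).filter (fun ik => ik.2 == rank)).map (·.1)
      (List.range numRows).foldl (fun ct r =>
        cols.foldl (fun ct c => ct ++ ((grid.getD r []).getD c.toNat [])) ct) ct) []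
  String.ofList ct

-- ===== PORT B =====
def myszkowski_encrypt_alt (plaintext : String) (key : String) : String :=
  let text : List Char := PySem.Chars.upper (PySem.Chars.replace plaintext.toList [' '] [])
  let ks : List Char := key.toList
  let numCols : Nat := ks.length
  -- math.ceil(len(text) / num_cols) as exact ceiling division -((-a) // b)
  let numRows : Nat := (-(PySem.Int.floordiv (-(text.length : Int)) (numCols : Int))).toNat
  let padded : List Char := text ++ List.replicate (numRows * numCols - text.length) 'X'
  let buckets : PySem.Dict Char (List Char) :=
    (PySem.List.enumerate padded).foldl
      (fun d pr => d.modify (PySem.List.pyGetD ks (PySem.Int.mod pr.1 (numCols : Int)) ' ') [] (· ++ [pr.2]))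
      PySem.Dict.empty
  String.ofList (((PySem.List.sorted buckets.keys (fun x => x) false).map (fun k => buckets.getD k [])).flatten)

-- ===== PRECONDITION & SPEC =====
-- Pre_ excludes only the empty key, on which A raises ZeroDivisionError.
def Pre_myszkowski_encrypt (plaintext : String) (key : String) : Prop := key ≠ ""
instance (plaintext : String) (key : String) : Decidable (Pre_myszkowski_encrypt plaintext key) := by unfold Pre_myszkowski_encrypt; infer_instance
def pvWitness_myszkowski_encrypt : String × String := ("HELLO WORLD", "TOMATO")

def Spec_myszkowski_encrypt (plaintext : String) (key : String) (out : String) : Prop := out = myszkowski_encrypt_alt plaintext key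
instance (plaintext : String) (key : String) (out : String) : Decidable (Spec_myszkowski_encrypt plaintext key out) := by unfold Spec_myszkowski_encrypt; infer_instance

-- ===== CLAIM (what is proved, stated in full; the proofs are below) =====
def Claim_equal_myszkowski_encrypt : Prop := ∀ (plaintext : String) (key : String), Dom_myszkowski_encrypt plaintext key → Pre_myszkowski_encrypt plaintext key → Spec_myszkowski_encrypt plaintext key (myszkowski_encrypt plaintext key)

-- ===== LEMMAS AND PROOFS =====

lemma pvSetsFold {α : Type} (v : Nat → α) : ∀ (m : Nat) (row : List α), m ≤ row.length →
    (List.range m).foldl (fun acc c => acc.set c (v c)) row = ((List.range m).map v) ++ row.drop m := by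
  intro m
  induction m with
  | zero => simp
  | succ m ih =>
    intro row hm
    rw [List.range_succ, List.foldl_append, ih row (by omega)]
    simp only [List.foldl_cons, List.foldl_nil, List.map_append, List.map_cons, List.map_nil]
    rw [List.set_append_right _ _ (by simp)]
    have hd : (List.drop m row).set 0 (v m) = v m :: List.drop (m + 1) row := by
      rw [List.drop_eq_getElem_cons (show m < row.length by omega)]
      rfl
    simp only [List.length_map, List.length_range, Nat.sub_self, hd]
    simp [List.append_assoc]

lemma pvRowFactor (p : List Char) (r : Nat) :
    ∀ (cs : List Nat) (g : List (List (List Char))) (idx : Nat), r < g.length →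
    cs.foldl (fun (st : List (List (List Char)) × Nat) c =>
        if st.2 < p.length then
          (st.1.set r ((st.1.getD r []).set c [p.getD st.2 ' ']), st.2 + 1)
        else
          (st.1.set r ((st.1.getD r []).set c ['X']), st.2)) (g, idx)
    = (g.set r (cs.foldl (fun (st : List (List Char) × Nat) c =>
          if st.2 < p.length then (st.1.set c [p.getD st.2 ' '], st.2 + 1)
          else (st.1.set c ['X'], st.2)) (g.getD r [], idx)).1,
       (cs.foldl (fun (st : List (List Char) × Nat) c =>
          if st.2 < p.length then (st.1.set c [p.getD st.2 ' '], st.2 + 1)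
          else (st.1.set c ['X'], st.2)) (g.getD r [], idx)).2) := by
  intro cs
  induction cs with
  | nil =>
    intro g idx hr
    simp only [List.foldl_nil]
    rw [List.getD_eq_getElem _ _ hr, List.set_getElem_self]
  | cons c cs ih =>
    intro g idx hr
    simp only [List.foldl_cons]
    by_cases h : idx < p.length
    · simp only [if_pos h]
      rw [ih _ _ (by simpa using hr)]
      have hg : ∀ x : List (List Char), (g.set r x).getD r [] = x := by
        intro x
        rw [List.getD_eq_getElem _ _ (by simpa using hr)]
        exact List.getElem_set_self (by simpa using hr)
      rw [hg, List.set_set, List.getD_eq_getElem _ _ hr]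
    · simp only [if_neg h]
      rw [ih _ _ (by simpa using hr)]
      have hg : ∀ x : List (List Char), (g.set r x).getD r [] = x := by
        intro x
        rw [List.getD_eq_getElem _ _ (by simpa using hr)]
        exact List.getElem_set_self (by simpa using hr)
      rw [hg, List.set_set, List.getD_eq_getElem _ _ hr]

lemma pvRowFold (p : List Char) (s : Nat) (row : List (List Char)) :
    ∀ (m : Nat),
    (List.range m).foldl (fun (st : List (List Char) × Nat) c =>
        if st.2 < p.length then (st.1.set c [p.getD st.2 ' '], st.2 + 1)
        else (st.1.set c ['X'], st.2)) (row, min s p.length)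
    = ((List.range m).foldl (fun acc c =>
          acc.set c [if s + c < p.length then p.getD (s + c) ' ' else 'X']) row,
       min (s + m) p.length) := by
  intro m
  induction m with
  | zero => simp
  | succ m ih =>
    rw [List.range_succ, List.foldl_append, List.foldl_append, ih]
    simp only [List.foldl_cons, List.foldl_nil]
    by_cases h : s + m < p.length
    · rw [if_pos (show min (s + m) p.length < p.length by omega), if_pos h]
      rw [show min (s + m) p.length = s + m from by omega]
      rw [show min (s + (m + 1)) p.length = s + m + 1 from by omega]
    · rw [if_neg (show ¬ min (s + m) p.length < p.length by omega), if_neg h]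
      rw [show min (s + (m + 1)) p.length = min (s + m) p.length from by omega]

lemma pvOuterFold (p : List Char) (n : Nat) (nr : Nat) :
    ∀ (k : Nat), k ≤ nr →
    (List.range k).foldl (fun (st : List (List (List Char)) × Nat) r =>
      (List.range n).foldl (fun st c =>
        if st.2 < p.length then
          (st.1.set r ((st.1.getD r []).set c [p.getD st.2 ' ']), st.2 + 1)
        else
          (st.1.set r ((st.1.getD r []).set c ['X']), st.2)) st)
      (List.replicate nr ((List.range n).map (fun _ => ([] : List Char))), 0)
    = ((List.range k).map (fun r => (List.range n).map
          (fun c => [if r * n + c < p.length then p.getD (r * n + c) ' ' else 'X']))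
        ++ List.replicate (nr - k) ((List.range n).map (fun _ => ([] : List Char))),
       min (k * n) p.length) := by
  intro k
  induction k with
  | zero => simp
  | succ k ih =>
    intro hk
    rw [List.range_succ, List.foldl_append, ih (by omega)]
    simp only [List.foldl_cons, List.foldl_nil]
    set row0 : List (List Char) := (List.range n).map (fun _ => ([] : List Char)) with hrow0
    set G : List (List (List Char)) := (List.range k).map (fun r => (List.range n).map
          (fun c => [if r * n + c < p.length then p.getD (r * n + c) ' ' else 'X'])) with hG
    have hGlen : G.length = k := by simp [hG]
    have hlen : (G ++ List.replicate (nr - k) row0).length = nr := by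
      simp [hGlen]; omega
    rw [pvRowFactor p k _ _ _ (by omega)]
    have hget : (G ++ List.replicate (nr - k) row0).getD k [] = row0 := by
      rw [List.getD_eq_getElem _ _ (by omega)]
      rw [List.getElem_append_right (by omega)]
      rw [List.getElem_replicate]
    rw [hget, pvRowFold p (k * n) row0 n]
    rw [pvSetsFold _ n row0 (by simp [hrow0])]
    refine Prod.ext ?_ ?_
    · simp only []
      rw [List.drop_eq_nil_of_le (by simp [hrow0]), List.append_nil]
      rw [List.set_append_right _ _ (by omega), hGlen, Nat.sub_self]
      rw [show nr - k = (nr - (k + 1)) + 1 from by omega, List.replicate_succ]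
      simp [List.map_append, List.append_assoc, hG, List.getD_eq_getElem?_getD]
    · simp only []
      rw [Nat.succ_mul]

lemma pvRangeSplit {α : Type} (q : Nat → Bool) (f : Nat → α) (n : Nat) :
    ∀ nr : Nat,
    ((List.range (nr * n)).filter (fun i => q (i % n))).map f
    = (List.range nr).flatMap (fun r => ((List.range n).filter q).map (fun c => f (r * n + c))) := by
  intro nr
  induction nr with
  | zero => simp
  | succ nr ih =>
    rw [Nat.succ_mul, List.range_add, List.filter_append, List.map_append, ih]
    rw [List.range_succ, List.flatMap_append, List.flatMap_singleton]
    congr 1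
    rw [List.filter_map]
    have hc : ∀ c ∈ List.range n, (fun i => q (i % n)) ((fun x => nr * n + x) c) = q c := by
      intro c hc
      simp only [List.mem_range] at hc
      simp [Nat.add_comm (nr * n) c, Nat.add_mul_mod_self_right, Nat.mod_eq_of_lt hc]
    rw [List.filter_congr ?_, List.map_map]
    · rfl
    · intro c hcm
      exact hc c hcm

lemma pvFirstBlock (ks : List Char) :
    (List.range ks.length).map (fun i => ks.getD (i % ks.length) ' ') = ks := by
  apply List.ext_getElem
  · simp
  · intro i h1 h2
    simp only [List.getElem_map, List.getElem_range]
    simp only [List.length_map, List.length_range] at h1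
    rw [Nat.mod_eq_of_lt (by simpa using h1)]
    rw [List.getD_eq_getElem _ _ (by simpa using h1)]

lemma pvSetUpdateSubset {α : Type} [BEq α] [LawfulBEq α] :
    ∀ (ys : List α) (s : PySem.Set α), (∀ y ∈ ys, y ∈ s) → PySem.Set.update s ys = s := by
  intro ys
  induction ys with
  | nil => intro s _; rw [PySem.Set.update_nil]
  | cons y ys ih =>
    intro s h
    rw [PySem.Set.update_cons]
    have hy : PySem.Set.add s y = s := by
      simp [PySem.Set.add, PySem.Set.contains, h y (by simp)]
    rw [hy]
    exact ih s (fun z hz => h z (by simp [hz]))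

lemma pvPaddedGetD (p : List Char) (pad i : Nat) :
    (p ++ List.replicate pad 'X').getD i 'X'
    = if i < p.length then p.getD i ' ' else 'X' := by
  by_cases h : i < p.length
  · rw [if_pos h, List.getD_append _ _ _ _ h]
    rw [List.getD_eq_getElem _ _ h, List.getD_eq_getElem _ _ h]
  · rw [if_neg h]
    simp only [List.getD_eq_getElem?_getD, List.getElem?_append_right (by omega : p.length ≤ i),
      List.getElem?_replicate]
    split_ifs <;> rfl

lemma pvColsEq (ks : List Char) (rank : Char) :
    ((PySem.List.enumerate ks).filter (fun ik => ik.2 == rank)).map (·.1)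
    = List.map Int.ofNat ((List.range ks.length).filter (fun c => ks.getD c ' ' == rank)) := by
  rw [PySem.List.enumerate_eq_map_pyRange ks ' ']
  rw [show PySem.List.len ks = (ks.length : Int) from by simp [PySem.List.len]]
  rw [PySem.List.pyRange_zero_natCast, List.map_map, List.filter_map, List.map_map]
  simp [Function.comp_def, PySem.List.pyGetD_natCast]

lemma pvRankRead (ks : List Char) (nr : Nat) (g : List (List (List Char))) (val : Nat → Char)
    (hg : ∀ r c, r < nr → c < ks.length → (g.getD r []).getD c [] = [val (r * ks.length + c)])
    (rank : Char) (ct : List Char) :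
    (List.range nr).foldl (fun ct r =>
        (((PySem.List.enumerate ks).filter (fun ik => ik.2 == rank)).map (·.1)).foldl
          (fun ct c => ct ++ ((g.getD r []).getD c.toNat [])) ct) ct
    = ct ++ ((List.range (nr * ks.length)).filter
        (fun i => ks.getD (i % ks.length) ' ' == rank)).map val := by
  rw [pvRangeSplit (fun c => ks.getD c ' ' == rank) val ks.length nr]
  rw [PySem.List.foldl_congr_mem _ _
      (fun ct r => ct ++ ((List.range ks.length).filter (fun c => ks.getD c ' ' == rank)).map
        (fun c => val (r * ks.length + c))) _ ?_]
  · rw [PySem.List.foldl_append_eq_flatMap]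
  · intro acc r hr
    simp only [List.mem_range] at hr
    rw [pvColsEq, List.foldl_map]
    rw [PySem.List.foldl_congr_mem _ _
        (fun ct c => ct ++ [val (r * ks.length + c)]) _ ?_]
    · rw [PySem.List.foldl_append_singleton_eq_map]
    · intro acc2 c hc
      simp only [List.mem_filter, List.mem_range] at hc
      rw [show (Int.ofNat c).toNat = c from by simp]
      rw [hg r c hr hc.1]

lemma pvReadPhase (ks : List Char) (nr : Nat) (g : List (List (List Char))) (val : Nat → Char)
    (hg : ∀ r c, r < nr → c < ks.length → (g.getD r []).getD c [] = [val (r * ks.length + c)])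
    (ranks : List Char) :
    ranks.foldl (fun ct rank =>
      (List.range nr).foldl (fun ct r =>
        (((PySem.List.enumerate ks).filter (fun ik => ik.2 == rank)).map (·.1)).foldl
          (fun ct c => ct ++ ((g.getD r []).getD c.toNat [])) ct) ct) []
    = ranks.flatMap (fun rank => ((List.range (nr * ks.length)).filter
        (fun i => ks.getD (i % ks.length) ' ' == rank)).map val) := by
  rw [PySem.List.foldl_congr_mem _ _
      (fun ct rank => ct ++ ((List.range (nr * ks.length)).filter
        (fun i => ks.getD (i % ks.length) ' ' == rank)).map val) _ ?_]
  · rw [PySem.List.foldl_append_eq_flatMap]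
    simp
  · intro acc rank _
    exact pvRankRead ks nr g val hg rank acc

lemma pvRanksEq (ks : List Char) (nr : Nat) (hn : 0 < ks.length) (hnr : 0 < nr) :
    PySem.Set.ofList ((List.range (nr * ks.length)).map (fun i => ks.getD (i % ks.length) ' '))
    = PySem.Set.ofList ks := by
  rw [show nr * ks.length = ks.length + (nr - 1) * ks.length from by
      cases nr with | zero => omega | succ m => simp [Nat.succ_mul]; ring]
  rw [List.range_add, List.map_append, pvFirstBlock]
  rw [PySem.Set.ofList_append]
  apply pvSetUpdateSubset
  intro y hy
  simp only [List.mem_map] at hy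
  obtain ⟨j, _, rfl⟩ := hy
  rw [PySem.Set.mem_ofList]
  rw [List.getD_eq_getElem _ _ (Nat.mod_lt _ hn)]
  exact List.getElem_mem _

lemma pvMain (p ks : List Char) (nr : Nat) (hn : 0 < ks.length)
    (hup : p.length ≤ nr * ks.length) :
    ((PySem.List.sorted (PySem.Set.ofList ks) (fun x => x) false).foldl (fun ct rank =>
      (List.range nr).foldl (fun ct r =>
        (((PySem.List.enumerate ks).filter (fun ik => ik.2 == rank)).map (·.1)).foldl
          (fun ct c => ct ++
            ((((List.range nr).foldl (fun (st : List (List (List Char)) × Nat) r =>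
                (List.range ks.length).foldl (fun st c =>
                  if st.2 < p.length then
                    (st.1.set r ((st.1.getD r []).set c [p.getD st.2 ' ']), st.2 + 1)
                  else
                    (st.1.set r ((st.1.getD r []).set c ['X']), st.2)) st)
                ((List.range nr).map (fun _ => (List.range ks.length).map (fun _ => ([] : List Char))), 0)).1.getD
              r []).getD c.toNat [])) ct) ct) [])
    = ((PySem.List.sorted
          ((PySem.List.enumerate (p ++ List.replicate (nr * ks.length - p.length) 'X')).foldl
            (fun d pr => d.modify
              (PySem.List.pyGetD ks (PySem.Int.mod pr.1 (ks.length : Int)) ' ') [] (· ++ [pr.2]))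
            PySem.Dict.empty).keys (fun x => x) false).map
        (fun k => ((PySem.List.enumerate (p ++ List.replicate (nr * ks.length - p.length) 'X')).foldl
            (fun d pr => d.modify
              (PySem.List.pyGetD ks (PySem.Int.mod pr.1 (ks.length : Int)) ' ') [] (· ++ [pr.2]))
            PySem.Dict.empty).getD k [])).flatten := by
  set n := ks.length with hns
  set val : Nat → Char := fun i => if i < p.length then p.getD i ' ' else 'X' with hval
  set padded : List Char := p ++ List.replicate (nr * n - p.length) 'X' with hpadded
  have hplen : padded.length = nr * n := by simp [hpadded]; omega
  -- A side: the filled grid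
  have hfill : ((List.range nr).foldl (fun (st : List (List (List Char)) × Nat) r =>
      (List.range n).foldl (fun st c =>
        if st.2 < p.length then
          (st.1.set r ((st.1.getD r []).set c [p.getD st.2 ' ']), st.2 + 1)
        else
          (st.1.set r ((st.1.getD r []).set c ['X']), st.2)) st)
      ((List.range nr).map (fun _ => (List.range n).map (fun _ => ([] : List Char))), 0)).1
      = (List.range nr).map (fun r => (List.range n).map (fun c => [val (r * n + c)])) := by
    rw [show (List.range nr).map (fun _ => (List.range n).map (fun _ => ([] : List Char)))
        = List.replicate nr ((List.range n).map (fun _ => ([] : List Char))) from by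
        simp [List.map_const']]
    rw [pvOuterFold p n nr nr le_rfl]
    simp [hval]
  rw [hfill]
  have hg : ∀ r c, r < nr → c < n →
      (((List.range nr).map (fun r => (List.range n).map (fun c => [val (r * n + c)]))).getD r []).getD c []
      = [val (r * n + c)] := by
    intro r c hr hc
    have h1 : ((List.range nr).map (fun r => (List.range n).map (fun c => [val (r * n + c)]))).getD r []
        = (List.range n).map (fun c => [val (r * n + c)]) := by
      rw [List.getD_eq_getElem _ _ (by simpa using hr)]
      rw [List.getElem_map, List.getElem_range]
    rw [h1, List.getD_eq_getElem _ _ (by simpa using hc)]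
    rw [List.getElem_map, List.getElem_range]
  rw [pvReadPhase ks nr _ val hg]
  -- B side: buckets
  have henum : PySem.List.enumerate padded
      = List.map (fun k => (Int.ofNat k, padded.getD k 'X')) (List.range (nr * n)) := by
    rw [PySem.List.enumerate_eq_map_pyRange padded 'X']
    rw [show PySem.List.len padded = ((nr * n : Nat) : Int) from by
        simp [PySem.List.len, hplen]]
    rw [PySem.List.pyRange_zero_natCast, List.map_map]
    simp [Function.comp_def, PySem.List.pyGetD_natCast]
  rw [henum]
  have hkeyfun : ∀ k : Nat, PySem.List.pyGetD ks (PySem.Int.mod (k : Int) (n : Int)) ' '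
      = ks.getD (k % n) ' ' := by
    intro k
    rw [PySem.Int.mod_natCast, PySem.List.pyGetD_natCast]
  have hfold : (List.map (fun k => (Int.ofNat k, padded.getD k 'X')) (List.range (nr * n))).foldl
      (fun d pr => d.modify (PySem.List.pyGetD ks (PySem.Int.mod pr.1 (n : Int)) ' ') [] (· ++ [pr.2]))
      PySem.Dict.empty
      = (List.range (nr * n)).foldl
        (fun d k => d.modify ((fun k : Nat => ks.getD (k % n) ' ') k) [] ((fun (_ : PySem.Dict Char (List Char)) (k : Nat) => (· ++ [padded.getD k 'X'])) d k))
        PySem.Dict.empty := by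
    rw [List.foldl_map]
    refine PySem.List.foldl_congr_mem _ _ _ _ ?_
    intro acc k _
    exact congrArg (fun z => acc.modify z [] fun x => x ++ [padded.getD k 'X']) (hkeyfun k)
  rw [hfold]
  have hkeys : ((List.range (nr * n)).foldl
      (fun d k => d.modify ((fun k : Nat => ks.getD (k % n) ' ') k) [] ((fun (_ : PySem.Dict Char (List Char)) (k : Nat) => (· ++ [padded.getD k 'X'])) d k))
      PySem.Dict.empty).keys
      = PySem.Set.ofList ((List.range (nr * n)).map (fun k => ks.getD (k % n) ' ')) := by
    rw [PySem.Dict.keys_foldl_modify_key]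
    rw [show (PySem.Dict.empty : PySem.Dict Char (List Char)).keys = [] from rfl]
    rw [PySem.Set.update_nil_left]
  have hgetD : ∀ v : Char, ((List.range (nr * n)).foldl
      (fun d k => d.modify ((fun k : Nat => ks.getD (k % n) ' ') k) [] ((fun (_ : PySem.Dict Char (List Char)) (k : Nat) => (· ++ [padded.getD k 'X'])) d k))
      PySem.Dict.empty).getD v []
      = ((List.range (nr * n)).filter (fun k => ks.getD (k % n) ' ' == v)).map (fun k => padded.getD k 'X') := by
    intro v
    rw [show ((List.range (nr * n)).foldl
        (fun d k => d.modify ((fun k : Nat => ks.getD (k % n) ' ') k) [] ((fun (_ : PySem.Dict Char (List Char)) (k : Nat) => (· ++ [padded.getD k 'X'])) d k))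
        PySem.Dict.empty)
        = ((List.range (nr * n)).map (fun k => (ks.getD (k % n) ' ', padded.getD k 'X'))).foldl
          (fun d q => d.modify q.1 [] (· ++ [q.2])) PySem.Dict.empty from by
      rw [List.foldl_map]]
    rw [PySem.Dict.getD_foldl_modify_append]
    rw [show (PySem.Dict.empty : PySem.Dict Char (List Char)).getD v [] = [] from rfl]
    rw [List.filter_map, List.map_map]
    rfl
  rw [hkeys]
  by_cases hnr : 0 < nr
  · have hR := pvRanksEq ks nr hn hnr
    rw [← hns] at hR
    rw [hR]
    have hflat : ∀ (rs : List Char) (F : Char → List Char), (rs.map F).flatten = rs.flatMap F :=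
      fun rs F => rfl
    rw [hflat]
    refine List.flatMap_congr (fun v _ => ?_)
    rw [hgetD v]
    refine List.map_congr_left (fun k _ => ?_)
    rw [hpadded, pvPaddedGetD, hval]
  · have h0 : nr = 0 := by omega
    subst h0
    simp

-- ===== VERDICT (by name: the statement is the Claim_ definition above) =====
theorem myszkowski_encrypt_spec : Claim_equal_myszkowski_encrypt := by
  intro pt key hdom hpre
  unfold Spec_myszkowski_encrypt
  unfold Pre_myszkowski_encrypt at hpre
  have hn : 0 < key.toList.length := by
    cases hk : key.toList with
    | nil => exact absurd (String.toList_eq_nil_iff.mp hk) hpre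
    | cons a l => simp
  simp only [myszkowski_encrypt, myszkowski_encrypt_alt, clean_text]
  have htext : (PySem.Str.upper (PySem.Str.replace pt " " "")).toList
      = PySem.Chars.upper (PySem.Chars.replace pt.toList [' '] []) := by
    simp
  rw [htext]
  set p : List Char := PySem.Chars.upper (PySem.Chars.replace pt.toList [' '] []) with hp
  set ks : List Char := key.toList with hks
  set q : Int := -(PySem.Int.floordiv (-(p.length : Int)) (ks.length : Int)) with hq
  have hb := (PySem.Int.neg_floordiv_neg_eq_iff_of_pos
      (show (0 : Int) < (ks.length : Int) by exact_mod_cast hn)).mp hq.symm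
  have hq0 : 0 ≤ q := by
    rcases hb with ⟨h1, h2⟩
    by_contra hneg
    push Not at hneg
    have : q * (ks.length : Int) ≤ (-1) * (ks.length : Int) := by
      apply mul_le_mul_of_nonneg_right (by omega) (by positivity)
    have := h2.trans this
    omega
  have hcast : ((q.toNat : Int)) = q := Int.toNat_of_nonneg hq0
  have hup : p.length ≤ q.toNat * ks.length := by
    rcases hb with ⟨h1, h2⟩
    have : (p.length : Int) ≤ (q.toNat : Int) * (ks.length : Int) := by rw [hcast]; exact h2
    exact_mod_cast this
  exact congrArg String.ofList (pvMain p ks q.toNat hn hup)
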